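-- pv_equiv track=rewrite | github.com/AyayaXiaowang/Ayaya_Miliastra_Editor | private_extensions/ugc_file_tools/gil_dump_codec/protobuf_like.py | _sorted_field_keys
-- ===== SOURCE A (Python) =====
-- from typing import Any, Dict, Iterable, List, Optional, Tuple
--
-- def _sorted_field_keys(keys: Iterable[str]) -> List[str]:
--     numeric_keys: List[Tuple[int, str]] = []
--     other_keys: List[str] = []
--     for key in keys:
--         if isinstance(key, str) and key.isdigit():
--             numeric_keys.append((int(key), key))
--         else:
--             other_keys.append(str(key))
--     numeric_keys.sort(key=lambda item: item[0])
--     other_keys.sort()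
--     return [key for _num, key in numeric_keys] + other_keys
-- ===== SOURCE B (Python) =====
-- def _sorted_field_keys(keys):
--     def rank(key):
--         return (0, int(key), "") if key.isdigit() else (1, 0, key)
--     return sorted(keys, key=rank)
-- ===== Notes on version B (the rewrite author's own statement) =====
-- stated objective: alternative
-- what changed: Replaces A's two-accumulator partition followed by two separate sorts and a concatenation with a single stable sort of the whole key list under one composite rank key (numeric-first tag, int value, string).
import Mathlib
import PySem

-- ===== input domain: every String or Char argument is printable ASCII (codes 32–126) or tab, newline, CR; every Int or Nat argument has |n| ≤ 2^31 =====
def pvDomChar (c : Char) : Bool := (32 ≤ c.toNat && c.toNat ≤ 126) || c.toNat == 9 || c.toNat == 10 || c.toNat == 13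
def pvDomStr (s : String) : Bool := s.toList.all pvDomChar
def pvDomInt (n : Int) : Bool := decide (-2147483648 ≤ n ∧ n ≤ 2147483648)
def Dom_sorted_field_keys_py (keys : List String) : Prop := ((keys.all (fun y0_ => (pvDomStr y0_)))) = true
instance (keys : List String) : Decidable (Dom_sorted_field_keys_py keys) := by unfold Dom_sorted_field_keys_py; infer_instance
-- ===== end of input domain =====

-- B replaces A's two-list partition + two separate sorts + concatenation by one stable
-- sort of the whole list under a composite rank key (numeric-first tag, int value, string);
-- alternative decomposition, same result.

-- ===== PORT A =====
-- int(key) on a key with key.isdigit() = true never raises; ofStr? is some there,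
-- so the getD 0 default is unreachable.
def pvIntVal (k : String) : Int := (PySem.Int.ofStr? k).getD 0

-- keys : List String, so Python's isinstance(key, str) is True and str(key) is key.
def sorted_field_keys_py (keys : List String) : List String :=
  let acc := keys.foldl
    (fun (acc : List (Int × String) × List String) key =>
      if PySem.Str.strIsdigit key then (acc.1 ++ [(pvIntVal key, key)], acc.2)
      else (acc.1, acc.2 ++ [key]))
    ([], [])
  let numeric := PySem.List.sorted acc.1 (fun item => item.1) false
  let other := PySem.List.sorted acc.2 (fun x => x) false
  numeric.map (fun p => p.2) ++ other

-- ===== PORT B =====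
-- rank(key) = (0, int(key), "") if key.isdigit() else (1, 0, key)
def pvRank (k : String) : Int × Int × String :=
  if PySem.Str.strIsdigit k then (0, pvIntVal k, "") else (1, 0, k)

-- Python's lexicographic '<' on the 3-tuples pvRank produces (components: Int, Int, String)
def pvLt3 (x y : Int × Int × String) : Bool :=
  decide (x.1 < y.1) ||
    (x.1 == y.1 && (decide (x.2.1 < y.2.1) || (x.2.1 == y.2.1 && decide (x.2.2 < y.2.2))))

-- sorted(keys, key=rank): stable insertion sort with the tuple key expanded into an
-- explicit lexicographic 'before', exactly the way PySem ports tuple keys (cf.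
-- PySem.List.sorted2 = foldl of insertBy with such a 'before'; PySem.List.sorted_eq_foldl_insertBy)
def sorted_field_keys_py_alt (keys : List String) : List String :=
  keys.foldl
    (fun acc key => PySem.List.insertBy (fun a b => pvLt3 (pvRank a) (pvRank b)) key acc) []

-- ===== PRECONDITION & SPEC =====
def Spec_sorted_field_keys_py (keys : List String) (out : List String) : Prop := out = sorted_field_keys_py_alt keys
instance (keys : List String) (out : List String) : Decidable (Spec_sorted_field_keys_py keys out) := by unfold Spec_sorted_field_keys_py; infer_instance

-- ===== CLAIM (what is proved, stated in full; the proofs are below) =====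
def Claim_equal_sorted_field_keys_py : Prop := ∀ (keys : List String), Dom_sorted_field_keys_py keys → Spec_sorted_field_keys_py keys (sorted_field_keys_py keys)

-- ===== LEMMAS AND PROOFS =====

-- inserting with equal comparison results is the same insertion
theorem pv_insertBy_congr {α : Type} (b1 b2 : α → α → Bool) (x : α) (ys : List α)
    (h : ∀ y ∈ ys, b1 x y = b2 x y) :
    PySem.List.insertBy b1 x ys = PySem.List.insertBy b2 x ys := by
  induction ys with
  | nil => rfl
  | cons y t ih =>
    simp only [PySem.List.insertBy, h y (by simp)]
    split
    · rfl
    · rw [ih (fun z hz => h z (by simp [hz]))]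

theorem pv_foldl_insertBy_congr {α : Type} (b1 b2 : α → α → Bool) (xs acc : List α)
    (h : ∀ a, (a ∈ xs ∨ a ∈ acc) → ∀ b, (b ∈ xs ∨ b ∈ acc) → b1 a b = b2 a b) :
    xs.foldl (fun acc x => PySem.List.insertBy b1 x acc) acc
      = xs.foldl (fun acc x => PySem.List.insertBy b2 x acc) acc := by
  induction xs generalizing acc with
  | nil => rfl
  | cons x t ih =>
    simp only [List.foldl_cons]
    rw [pv_insertBy_congr b1 b2 x acc
        (fun y hy => h x (Or.inl (by simp)) y (Or.inr hy))]
    exact ih _ (fun a ha b hb => by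
      apply h
      · rcases ha with ha | ha
        · exact Or.inl (by simp [ha])
        · rcases (PySem.List.mem_insertBy _ x a acc).1 ha with rfl | ha
          · exact Or.inl (by simp)
          · exact Or.inr ha
      · rcases hb with hb | hb
        · exact Or.inl (by simp [hb])
        · rcases (PySem.List.mem_insertBy _ x b acc).1 hb with rfl | hb
          · exact Or.inl (by simp)
          · exact Or.inr hb)

-- an insertion-sort fold whose comparison agrees with 'key <' on the list IS sorted(xs, key)
theorem pv_foldl_eq_sorted {α κ : Type} [LinearOrder κ] (bef : α → α → Bool) (key : α → κ)
    (xs : List α) (h : ∀ a ∈ xs, ∀ b ∈ xs, bef a b = decide (key a < key b)) :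
    xs.foldl (fun acc x => PySem.List.insertBy bef x acc) []
      = PySem.List.sorted xs key false := by
  rw [PySem.List.sorted_eq_foldl_insertBy]
  exact pv_foldl_insertBy_congr bef _ xs []
    (fun a ha b hb => h a (by simpa using ha) b (by simpa using hb))

theorem pv_insertBy_map {α β : Type} (f : β → α) (b : α → α → Bool) (x : β) (ys : List β) :
    PySem.List.insertBy b (f x) (ys.map f)
      = (PySem.List.insertBy (fun a c => b (f a) (f c)) x ys).map f := by
  induction ys with
  | nil => rfl
  | cons y t ih =>
    simp only [List.map_cons, PySem.List.insertBy]
    split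
    · simp
    · simp [ih]

-- sorting a mapped list = mapping the sort under the composed key
theorem pv_sorted_map {α β κ : Type} [LinearOrder κ] (f : β → α) (key : α → κ) (xs : List β) :
    PySem.List.sorted (xs.map f) key false
      = (PySem.List.sorted xs (fun x => key (f x)) false).map f := by
  rw [PySem.List.sorted_eq_foldl_insertBy, PySem.List.sorted_eq_foldl_insertBy]
  have : ∀ (t : List β) (acc : List β),
      (t.map f).foldl (fun acc x => PySem.List.insertBy (fun a b => decide (key a < key b)) x acc) (acc.map f)
        = (t.foldl (fun acc x => PySem.List.insertBy (fun a b => decide (key (f a) < key (f b))) x acc) acc).map f := by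
    intro t
    induction t with
    | nil => intro acc; rfl
    | cons x s ih =>
      intro acc
      simp only [List.map_cons, List.foldl_cons]
      rw [pv_insertBy_map f _ x acc, ih]
  simpa using this xs []

theorem pv_insertBy_append_left {α : Type} (b : α → α → Bool) (x : α) (A B : List α)
    (h : ∀ y ∈ B, b x y = true) :
    PySem.List.insertBy b x (A ++ B) = PySem.List.insertBy b x A ++ B := by
  induction A with
  | nil =>
    cases B with
    | nil => rfl
    | cons y t => simp [PySem.List.insertBy, h y (by simp)]
  | cons a s ih =>
    simp only [List.cons_append, PySem.List.insertBy]
    split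
    · rfl
    · simp [ih]

theorem pv_insertBy_append_right {α : Type} (b : α → α → Bool) (x : α) (A B : List α)
    (h : ∀ a ∈ A, b x a = false) :
    PySem.List.insertBy b x (A ++ B) = A ++ PySem.List.insertBy b x B := by
  induction A with
  | nil => rfl
  | cons a s ih =>
    simp only [List.cons_append, PySem.List.insertBy, h a (by simp)]
    simp [ih (fun y hy => h y (by simp [hy]))]

-- a stable insertion sort whose comparison puts every p-element strictly before every
-- non-p-element splits into the two filtered sorts
theorem pv_foldl_insertBy_split {α : Type} (bef : α → α → Bool) (p : α → Bool)
    (h1 : ∀ a b, p a = true → p b = false → bef a b = true)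
    (h2 : ∀ a b, p a = true → p b = false → bef b a = false)
    (xs : List α) : ∀ (accA accB : List α),
    (∀ a ∈ accA, p a = true) → (∀ b ∈ accB, p b = false) →
    xs.foldl (fun acc x => PySem.List.insertBy bef x acc) (accA ++ accB)
      = (xs.filter p).foldl (fun acc x => PySem.List.insertBy bef x acc) accA
        ++ (xs.filter (fun x => !p x)).foldl (fun acc x => PySem.List.insertBy bef x acc) accB := by
  induction xs with
  | nil => intro accA accB _ _; rfl
  | cons x t ih =>
    intro accA accB hA hB
    by_cases hp : p x = true
    · rw [List.foldl_cons,
        pv_insertBy_append_left bef x accA accB (fun y hy => h1 x y hp (hB y hy)),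
        ih (PySem.List.insertBy bef x accA) accB
          (fun a ha => by
            rcases (PySem.List.mem_insertBy _ x a accA).1 ha with rfl | ha
            · exact hp
            · exact hA a ha) hB]
      simp [hp]
    · have hp' : p x = false := by simpa using hp
      rw [List.foldl_cons,
        pv_insertBy_append_right bef x accA accB (fun a ha => h2 a x (hA a ha) hp'),
        ih accA (PySem.List.insertBy bef x accB) hA
          (fun b hb => by
            rcases (PySem.List.mem_insertBy _ x b accB).1 hb with rfl | hb
            · exact hp'
            · exact hB b hb)]
      simp [hp']

-- A's loop builds exactly the filtered/mapped partition
theorem pv_partition_eq (keys : List String) (accN : List (Int × String)) (accO : List String) :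
    keys.foldl
      (fun (acc : List (Int × String) × List String) key =>
        if PySem.Str.strIsdigit key then (acc.1 ++ [(pvIntVal key, key)], acc.2)
        else (acc.1, acc.2 ++ [key])) (accN, accO)
      = (accN ++ (keys.filter (fun k => PySem.Str.strIsdigit k)).map (fun k => (pvIntVal k, k)),
         accO ++ keys.filter (fun k => !PySem.Str.strIsdigit k)) := by
  induction keys generalizing accN accO with
  | nil => simp
  | cons k t ih =>
    by_cases hd : PySem.Str.strIsdigit k = true
    · simp only [List.foldl_cons, List.filter_cons, hd, Bool.not_true, if_true, ih]
      simp
    · have hd' : PySem.Str.strIsdigit k = false := by simpa using hd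
      simp only [List.foldl_cons, List.filter_cons, hd', Bool.not_false, if_true, ih]
      simp

-- B's comparison on two digit keys is the int-value comparison
theorem pv_bef_digit_digit (a b : String)
    (ha : PySem.Str.strIsdigit a = true) (hb : PySem.Str.strIsdigit b = true) :
    pvLt3 (pvRank a) (pvRank b) = decide (pvIntVal a < pvIntVal b) := by
  simp only [pvRank, ha, hb, if_true]
  simp [pvLt3]

-- B's comparison on two non-digit keys is the string comparison
theorem pv_bef_other_other (a b : String)
    (ha : PySem.Str.strIsdigit a = false) (hb : PySem.Str.strIsdigit b = false) :
    pvLt3 (pvRank a) (pvRank b) = decide (a < b) := by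
  simp only [pvRank, ha, hb]
  rw [if_neg (by simp), if_neg (by simp)]
  simp [pvLt3]

theorem pv_bef_digit_other (a b : String)
    (ha : PySem.Str.strIsdigit a = true) (hb : PySem.Str.strIsdigit b = false) :
    pvLt3 (pvRank a) (pvRank b) = true := by
  simp only [pvRank, ha, hb, if_true]
  rw [if_neg (by simp)]
  simp [pvLt3]

theorem pv_bef_other_digit (a b : String)
    (ha : PySem.Str.strIsdigit a = true) (hb : PySem.Str.strIsdigit b = false) :
    pvLt3 (pvRank b) (pvRank a) = false := by
  simp only [pvRank, ha, hb, if_true]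
  rw [if_neg (by simp)]
  simp [pvLt3]

-- ===== VERDICT (by name: the statement is the Claim_ definition above) =====
theorem sorted_field_keys_py_spec : Claim_equal_sorted_field_keys_py := by
  intro keys _
  unfold Spec_sorted_field_keys_py sorted_field_keys_py sorted_field_keys_py_alt
  rw [pv_partition_eq keys [] []]
  simp only [List.nil_append]
  rw [show ([] : List String) = [] ++ [] from rfl,
    pv_foldl_insertBy_split (fun a b => pvLt3 (pvRank a) (pvRank b))
      (fun k => PySem.Str.strIsdigit k)
      (fun a b ha hb => pv_bef_digit_other a b ha hb)
      (fun a b ha hb => pv_bef_other_digit a b ha hb)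
      keys [] [] (by simp) (by simp)]
  rw [pv_foldl_eq_sorted _ (fun k => pvIntVal k) _
      (fun a ha b hb => pv_bef_digit_digit a b
        (by simpa using (List.mem_filter.1 ha).2) (by simpa using (List.mem_filter.1 hb).2)),
    pv_foldl_eq_sorted _ (fun k => k) _
      (fun a ha b hb => pv_bef_other_other a b
        (by simpa using (List.mem_filter.1 ha).2) (by simpa using (List.mem_filter.1 hb).2))]
  congr 1
  rw [pv_sorted_map (fun k => (pvIntVal k, k)) (fun item => item.1)
    (keys.filter (fun k => PySem.Str.strIsdigit k))]
  rw [List.map_map]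
  have h2 : ((fun p : Int × String => p.2) ∘ fun k => (pvIntVal k, k)) = id := rfl
  rw [h2, List.map_id]
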